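-- pv_equiv track=rewrite | github.com/ruizaj13/CS-Solutions | 02_problem_solving/csSchoolYearsAndGroups/main.py | csSchoolYearsAndGroups
-- ===== SOURCE A (Python) =====
-- import string
--
-- def csSchoolYearsAndGroups(years, groups):
--     y = []
--
--     for l in list(string.ascii_lowercase[:groups]):
--        for n in  list(range(1, years + 1)):
--             n = str(n) + l
--             y.append(n)
--
--     y.sort(key=lambda word: int(word[:-1]))
--
--     return ', '.join(y)
-- ===== SOURCE B (Python) =====
-- import string
--
-- def csSchoolYearsAndGroups(years, groups):
--     letters = string.ascii_lowercase[:groups]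
--     if not letters:
--         return ''
--     return ', '.join(str(n) + l for n in range(1, years + 1) for l in letters)
-- ===== Notes on version B (the rewrite author's own statement) =====
-- stated objective: faster
-- what changed: B emits the labels directly in the final order (year-outer, letter-inner loop) and joins once, removing A's list-building in letter-major order followed by a stable key sort.
import Mathlib
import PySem

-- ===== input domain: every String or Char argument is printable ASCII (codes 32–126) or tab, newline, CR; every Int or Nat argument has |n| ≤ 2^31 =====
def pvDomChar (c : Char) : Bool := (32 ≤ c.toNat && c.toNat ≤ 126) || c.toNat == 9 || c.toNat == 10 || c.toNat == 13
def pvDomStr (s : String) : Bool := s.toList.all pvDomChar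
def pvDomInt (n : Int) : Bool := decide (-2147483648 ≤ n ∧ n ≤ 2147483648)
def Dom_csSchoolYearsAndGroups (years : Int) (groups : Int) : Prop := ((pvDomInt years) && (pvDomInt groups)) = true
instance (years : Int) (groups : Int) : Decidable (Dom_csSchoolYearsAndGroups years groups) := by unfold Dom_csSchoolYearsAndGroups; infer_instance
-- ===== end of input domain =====

-- B emits the labels directly in sorted order (year-outer, letter-inner loop) instead of
-- building them letter-major and stable-sorting by the parsed year prefix; measurably faster
-- only if a timing run says so — the honest claim is the removed sort.

-- ===== PORT A =====

-- string.ascii_lowercase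
def pvAsciiLowercase : String := "abcdefghijklmnopqrstuvwxyz"

-- int(s) as applied by A's sort key: every string the key receives is str(n) for n ≥ 1,
-- i.e. a nonempty all-digit string, and on those Python's int() is exactly this fold.
-- (PySem.Int.ofStr? is the general port of int(); its digit-parsing core is private to
-- PySem, so the key is ported by hand, exact on the all-digit strings A's key sees.)
def pvIntOfDigits (cs : List Char) : Int := cs.foldl (fun a c => 10 * a + ((c.toNat : Int) - 48)) 0

-- lambda word: int(word[:-1])
def pvKeyA (w : String) : Int := pvIntOfDigits (PySem.Str.slice w none (some (-1))).toList

def csSchoolYearsAndGroups (years : Int) (groups : Int) : String :=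
  -- y = []; for l in list(string.ascii_lowercase[:groups]): for n in list(range(1, years+1)): y.append(str(n)+l)
  let y : List String :=
    (PySem.Str.slice pvAsciiLowercase none (some groups)).toList.foldl
      (fun acc l =>
        (PySem.List.pyRange 1 (years + 1)).foldl
          (fun acc2 n => acc2 ++ [PySem.Int.toStr n ++ String.singleton l]) acc)
      []
  -- y.sort(key=lambda word: int(word[:-1])); return ', '.join(y)
  PySem.Str.join ", " (PySem.List.sorted y pvKeyA)

-- ===== PORT B =====
def csSchoolYearsAndGroups_alt (years : Int) (groups : Int) : String :=
  -- letters = string.ascii_lowercase[:groups]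
  let letters : List Char := (PySem.Str.slice pvAsciiLowercase none (some groups)).toList
  -- if not letters: return ''
  if letters = [] then "" else
  -- ', '.join(str(n) + l for n in range(1, years + 1) for l in letters)
  PySem.Str.join ", "
    ((PySem.List.pyRange 1 (years + 1)).flatMap
      (fun n => letters.map (fun l => PySem.Int.toStr n ++ String.singleton l)))

-- ===== PRECONDITION & SPEC =====
def Spec_csSchoolYearsAndGroups (years : Int) (groups : Int) (out : String) : Prop := out = csSchoolYearsAndGroups_alt years groups
instance (years : Int) (groups : Int) (out : String) : Decidable (Spec_csSchoolYearsAndGroups years groups out) := by unfold Spec_csSchoolYearsAndGroups; infer_instance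

-- ===== CLAIM (what is proved, stated in full; the proofs are below) =====
def Claim_equal_csSchoolYearsAndGroups : Prop := ∀ (years : Int) (groups : Int), Dom_csSchoolYearsAndGroups years groups → Spec_csSchoolYearsAndGroups years groups (csSchoolYearsAndGroups years groups)

-- ===== LEMMAS AND PROOFS =====

-- digit strings: Nat.toDigits 10, characterized structurally
def pvDig (n : ℕ) : List Char :=
  if h : n / 10 = 0 then [Nat.digitChar (n % 10)]
  else pvDig (n / 10) ++ [Nat.digitChar (n % 10)]
decreasing_by
  exact Nat.div_lt_self (Nat.pos_of_ne_zero (fun h0 => h (by simp [h0]))) (by norm_num)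

lemma pvToDigitsCore_eq (f : ℕ) : ∀ (n : ℕ) (ds : List Char), n < f →
    Nat.toDigitsCore 10 f n ds = pvDig n ++ ds := by
  induction f with
  | zero => intro n ds h; omega
  | succ f ih =>
    intro n ds _
    rw [Nat.toDigitsCore]
    by_cases h10 : n / 10 = 0
    · simp [h10, pvDig]
    · rw [if_neg h10, ih (n / 10) _ (by omega)]
      conv_rhs => rw [pvDig]
      rw [dif_neg h10]
      simp

lemma pvToDigits_eq (n : ℕ) : Nat.toDigits 10 n = pvDig n := by
  rw [Nat.toDigits, pvToDigitsCore_eq (n + 1) n [] (by omega)]; simp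

lemma pvDigitChar_toNat (k : ℕ) (h : k < 10) : (Nat.digitChar k).toNat = 48 + k := by
  interval_cases k <;> decide

lemma pvIntOfDigits_append (cs : List Char) (c : Char) :
    pvIntOfDigits (cs ++ [c]) = 10 * pvIntOfDigits cs + ((c.toNat : Int) - 48) := by
  simp [pvIntOfDigits, List.foldl_append]

lemma pvIntOfDigits_pvDig (n : ℕ) : pvIntOfDigits (pvDig n) = (n : Int) := by
  induction n using Nat.strong_induction_on with
  | _ n ih =>
    rw [pvDig]
    by_cases h10 : n / 10 = 0
    · have hn : n < 10 := by omega
      simp [h10, pvIntOfDigits, pvDigitChar_toNat (n % 10) (by omega)]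
      omega
    · rw [dif_neg h10, pvIntOfDigits_append,
        ih (n / 10) (Nat.div_lt_self (by omega) (by norm_num))]
      rw [pvDigitChar_toNat (n % 10) (by omega)]
      push_cast
      omega

-- the key A sorts by, evaluated on the strings A builds
lemma pvKeyA_elem (n : Int) (hn : 0 < n) (l : Char) :
    pvKeyA (PySem.Int.toStr n ++ String.singleton l) = n := by
  have htl : (PySem.Str.slice (PySem.Int.toStr n ++ String.singleton l) none (some (-1))).toList
      = PySem.Int.toChars n := by
    rw [PySem.Str.slice_to_neg_one, String.toList_append, String.toList_singleton,
      PySem.Int.toList_toStr, List.dropLast_concat]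
  rw [pvKeyA, htl, PySem.Int.toChars, if_neg (by omega), pvToDigits_eq,
    pvIntOfDigits_pvDig]
  omega

-- pyRange 1 (years+1) is strictly increasing
lemma pvPyRange_nil (a b : Int) (h : b ≤ a) : PySem.List.pyRange a b = [] := by
  apply List.eq_nil_iff_forall_not_mem.mpr
  intro x hx
  have := PySem.List.mem_pyRange_one.mp hx
  omega

lemma pvPyRange_pairwise_aux (k : ℕ) : ∀ a : Int, (PySem.List.pyRange a (a + k)).Pairwise (· < ·) := by
  induction k with
  | zero =>
    intro a
    rw [show (a + ((0 : ℕ) : Int)) = a by omega, pvPyRange_nil a a le_rfl]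
    exact List.Pairwise.nil
  | succ k ih =>
    intro a
    have h1 : (a : Int) + (k + 1 : ℕ) = (a + k) + 1 := by push_cast; ring
    rw [h1, PySem.List.pyRange_one_succ_right (by omega)]
    refine List.pairwise_append.mpr ⟨ih a, List.pairwise_singleton _ _, ?_⟩
    intro x hx y hy
    have := PySem.List.mem_pyRange_one.mp hx
    simp only [List.mem_singleton] at hy
    omega

lemma pvPyRange_pairwise (a b : Int) : (PySem.List.pyRange a b).Pairwise (· < ·) := by
  by_cases h : b ≤ a
  · rw [pvPyRange_nil a b h]; exact List.Pairwise.nil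
  · have hb : b = a + ((b - a).toNat : ℕ) := by omega
    rw [hb]; exact pvPyRange_pairwise_aux _ a

-- insertBy position lemmas
lemma pvInsertBy_append (before : String → String → Bool) (x : String) :
    ∀ (P Q : List String), (∀ a ∈ P, before x a = false) →
    PySem.List.insertBy before x (P ++ Q) = P ++ PySem.List.insertBy before x Q := by
  intro P
  induction P with
  | nil => intro Q _; simp
  | cons p P ih =>
    intro Q hP
    have hp : before x p = false := hP p (by simp)
    simp only [List.cons_append, PySem.List.insertBy, hp]
    simp only [Bool.false_eq_true, if_false]
    rw [ih Q (fun a ha => hP a (by simp [ha]))]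

lemma pvInsertBy_cons (before : String → String → Bool) (x : String) (Q : List String)
    (hQ : ∀ a ∈ Q, before x a = true) :
    PySem.List.insertBy before x Q = x :: Q := by
  cases Q with
  | nil => simp [PySem.List.insertBy]
  | cons q Q => simp [PySem.List.insertBy, hQ q (by simp)]

-- the A-side insertion loop: inserting the new letter's labels (years ascending) into the
-- already year-major list appends each label at the end of its year block
lemma pvInsLoop (K : String → Int) (e : Int → Char → String) (ls : List Char) (l : Char) :
    ∀ (R2 R1 : List Int), (R1 ++ R2).Pairwise (· < ·) →
    (∀ n ∈ R1 ++ R2, ∀ c : Char, K (e n c) = n) →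
    List.foldl (fun acc x => PySem.List.insertBy (fun a b => decide (K a < K b)) x acc)
      (R1.flatMap (fun n => ls.map (e n) ++ [e n l]) ++ R2.flatMap (fun n => ls.map (e n)))
      (R2.map (fun n => e n l))
    = (R1 ++ R2).flatMap (fun n => ls.map (e n) ++ [e n l]) := by
  intro R2
  induction R2 with
  | nil => intro R1 _ _; simp
  | cons m R2 ih =>
    intro R1 hpw hk
    have hmem : ∀ n ∈ R1, n < m := by
      intro n hn
      exact (List.pairwise_append.mp hpw).2.2 n hn m (by simp)
    have hmem2 : ∀ n ∈ R2, m < n := by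
      intro n hn
      exact (List.pairwise_cons.mp (List.pairwise_append.mp hpw).2.1).1 n hn
    have hkm : ∀ c : Char, K (e m c) = m := hk m (by simp)
    have hk1 : ∀ n ∈ R1, ∀ c : Char, K (e n c) = n := fun n hn => hk n (by simp [hn])
    have hk2 : ∀ n ∈ R2, ∀ c : Char, K (e n c) = n := fun n hn => hk n (by simp [hn])
    simp only [List.map_cons, List.foldl_cons]
    have hstep :
        PySem.List.insertBy (fun a b => decide (K a < K b)) (e m l)
          (R1.flatMap (fun n => ls.map (e n) ++ [e n l]) ++ (m :: R2).flatMap (fun n => ls.map (e n)))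
        = (R1 ++ [m]).flatMap (fun n => ls.map (e n) ++ [e n l]) ++ R2.flatMap (fun n => ls.map (e n)) := by
      have hflat : (m :: R2).flatMap (fun n => ls.map (e n))
          = ls.map (e m) ++ R2.flatMap (fun n => ls.map (e n)) := by simp
      rw [hflat, ← List.append_assoc]
      rw [pvInsertBy_append _ _ (R1.flatMap (fun n => ls.map (e n) ++ [e n l]) ++ ls.map (e m)) _ ?_]
      · rw [pvInsertBy_cons _ _ _ ?_]
        · simp [List.flatMap_append]
        · intro a ha
          simp only [List.mem_flatMap, List.mem_map] at ha
          obtain ⟨n, hn, c, _, rfl⟩ := ha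
          simp [hkm, hk2 n hn, hmem2 n hn]
      · intro a ha
        simp only [List.mem_append, List.mem_flatMap, List.mem_map] at ha
        rcases ha with ⟨n, hn, ha⟩ | ⟨c, _, rfl⟩
        · have hlt := hmem n hn
          rcases ha with ⟨c, _, rfl⟩ | ha
          · simp [hkm, hk1 n hn]
            omega
          · simp only [List.mem_singleton] at ha
            subst ha
            simp [hkm, hk1 n hn]
            omega
        · simp [hkm]
    rw [hstep]
    have hpw' : ((R1 ++ [m]) ++ R2).Pairwise (· < ·) := by
      simpa [List.append_assoc] using hpw
    have hk' : ∀ n ∈ (R1 ++ [m]) ++ R2, ∀ c : Char, K (e n c) = n := by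
      intro n hn; apply hk; simpa [List.append_assoc] using hn
    have := ih (R1 ++ [m]) hpw' hk'
    simpa [List.append_assoc] using this

-- stable sort of the letter-major list is the year-major list
lemma pvSortedTranspose (K : String → Int) (e : Int → Char → String) (R : List Int)
    (hR : R.Pairwise (· < ·)) (hk : ∀ n ∈ R, ∀ c : Char, K (e n c) = n) :
    ∀ ls : List Char,
    PySem.List.sorted (ls.flatMap fun l => R.map (fun n => e n l)) K
      = R.flatMap (fun n => ls.map (fun l => e n l)) := by
  intro ls
  induction ls using List.reverseRecOn with
  | nil => simp [PySem.List.sorted_eq_foldl_insertBy]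
  | append_singleton ls l ih =>
    rw [List.flatMap_append, PySem.List.sorted_eq_foldl_insertBy, List.foldl_append,
      ← PySem.List.sorted_eq_foldl_insertBy, ih]
    simp only [List.flatMap_singleton]
    have := pvInsLoop K e ls l R [] (by simpa using hR) (by simpa using hk)
    simp only [List.flatMap_nil, List.nil_append] at this
    rw [this]
    simp [List.map_append]

-- A's nested append loops build the letter-major list
lemma pvBuild (years : Int) (letters : List Char) :
    letters.foldl
      (fun acc l =>
        (PySem.List.pyRange 1 (years + 1)).foldl
          (fun acc2 n => acc2 ++ [PySem.Int.toStr n ++ String.singleton l]) acc)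
      []
    = letters.flatMap (fun l => (PySem.List.pyRange 1 (years + 1)).map
        (fun n => PySem.Int.toStr n ++ String.singleton l)) := by
  simp only [PySem.List.foldl_append_singleton_eq_map]
  rw [PySem.List.foldl_append_eq_flatMap]
  simp

-- ===== VERDICT (by name: the statement is the Claim_ definition above) =====
theorem csSchoolYearsAndGroups_spec : Claim_equal_csSchoolYearsAndGroups := by
  intro years groups _
  unfold Spec_csSchoolYearsAndGroups csSchoolYearsAndGroups csSchoolYearsAndGroups_alt
  by_cases hL : (PySem.Str.slice pvAsciiLowercase none (some groups)).toList = []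
  · simp only [hL, if_pos, List.foldl_nil]
    rfl
  · rw [if_neg hL]
    simp only [pvBuild]
    congr 1
    exact pvSortedTranspose pvKeyA (fun n l => PySem.Int.toStr n ++ String.singleton l)
      (PySem.List.pyRange 1 (years + 1)) (pvPyRange_pairwise 1 (years + 1))
      (fun n hn c => pvKeyA_elem n (by
        have := PySem.List.mem_pyRange_one.mp hn; omega) c)
      ((PySem.Str.slice pvAsciiLowercase none (some groups)).toList)
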